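-- pv_equiv track=rewrite | github.com/rfongls/Silhouette | silhouette_core/interop/deid.py | _set_hl7_path
-- ===== SOURCE A (Python) =====
-- COMP_SEP = "^"
--
-- SUBCOMP_SEP = "&"
--
-- def _set_hl7_path(
--     fields: list[str],
--     segment: str,
--     field_idx: int,
--     component_idx: int | None,
--     subcomponent_idx: int | None,
--     value: str,
-- ) -> list[str]:
--     """Write value into fields using 1-based HL7 indexing."""
--
--     pos = field_idx if segment != "MSH" else field_idx - 1
--     if pos < 0:
--         return fields
--
--     while pos >= len(fields):
--         fields.append("")
--
--     if component_idx is None: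
--         fields[pos] = value
--         return fields
--
--     current = fields[pos] or ""
--     comps = current.split(COMP_SEP)
--     comp_pos = component_idx - 1
--     while comp_pos >= len(comps):
--         comps.append("")
--
--     if subcomponent_idx is None:
--         comps[comp_pos] = value
--         fields[pos] = COMP_SEP.join(comps)
--         return fields
--
--     subs = (comps[comp_pos] or "").split(SUBCOMP_SEP)
--     sub_pos = subcomponent_idx - 1
--     while sub_pos >= len(subs):
--         subs.append("")
--     subs[sub_pos] = value
--     comps[comp_pos] = SUBCOMP_SEP.join(subs)
--     fields[pos] = COMP_SEP.join(comps)
--     return fields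
-- ===== SOURCE B (Python) =====
-- COMP_SEP = "^"
--
-- SUBCOMP_SEP = "&"
--
-- def _set_at(s, indices, seps, value):
--     parts = s.split(seps[0])
--     while indices[0] >= len(parts):
--         parts.append("")
--     if len(indices) == 1:
--         parts[indices[0]] = value
--     else:
--         parts[indices[0]] = _set_at(parts[indices[0]], indices[1:], seps[1:], value)
--     return seps[0].join(parts)
--
-- def _set_hl7_path(fields, segment, field_idx, component_idx, subcomponent_idx, value):
--     pos = field_idx if segment != "MSH" else field_idx - 1
--     if pos < 0:
--         return fields
--     while pos >= len(fields):
--         fields.append("")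
--     if component_idx is None:
--         fields[pos] = value
--         return fields
--     indices = [component_idx - 1]
--     seps = [COMP_SEP]
--     if subcomponent_idx is not None:
--         indices.append(subcomponent_idx - 1)
--         seps.append(SUBCOMP_SEP)
--     fields[pos] = _set_at(fields[pos] or "", indices, seps, value)
--     return fields
-- ===== Notes on version B (the rewrite author's own statement) =====
-- stated objective: simpler
-- what changed: A's two copy-pasted component/subcomponent split-pad-assign-join blocks are replaced by one recursive helper _set_at(s, indices, seps, value) applied along the index path; only the field-list padding and in-place assignment stay at the top.
import Mathlib
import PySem

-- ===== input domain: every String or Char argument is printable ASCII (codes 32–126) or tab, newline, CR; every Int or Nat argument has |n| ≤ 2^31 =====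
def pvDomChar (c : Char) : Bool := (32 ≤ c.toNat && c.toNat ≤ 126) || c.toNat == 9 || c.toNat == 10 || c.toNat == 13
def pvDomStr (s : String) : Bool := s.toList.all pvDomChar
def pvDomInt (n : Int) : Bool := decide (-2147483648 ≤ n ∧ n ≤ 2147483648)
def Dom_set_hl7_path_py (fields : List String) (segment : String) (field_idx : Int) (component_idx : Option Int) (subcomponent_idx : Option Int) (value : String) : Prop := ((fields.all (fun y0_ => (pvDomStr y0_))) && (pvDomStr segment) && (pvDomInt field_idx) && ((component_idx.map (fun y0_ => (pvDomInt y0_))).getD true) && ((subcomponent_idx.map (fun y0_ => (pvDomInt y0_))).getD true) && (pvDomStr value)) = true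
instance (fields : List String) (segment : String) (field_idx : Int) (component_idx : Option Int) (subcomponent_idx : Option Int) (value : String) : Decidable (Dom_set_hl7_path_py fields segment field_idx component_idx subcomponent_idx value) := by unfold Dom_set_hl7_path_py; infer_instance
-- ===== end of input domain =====

-- B replaces A's two copy-pasted component/subcomponent blocks with one recursive helper
-- over an index/separator path (objective: simpler decomposition, same cost).
-- Both Pythons mutate `fields` in place and return it; B performs the same mutation,
-- so the equivalence about the return value also covers the observable side effect.

-- shared helper: the `while i >= len(xs): xs.append("")` padding loop, which both
-- Pythons contain verbatim
def pvPad (xs : List String) (i : Int) : List String :=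
  if (xs.length : Int) ≤ i then pvPad (xs ++ [""]) i else xs
termination_by (i + 1 - xs.length).toNat
decreasing_by simp; omega

-- shared helper: Python's `s or ""` on a string
def pvOrEmpty (s : String) : String := if s = "" then "" else s

-- `s.split(sep)` for the nonempty literal separators "^"/"&" (split? is none only for sep = "")
def pvSplit (s sep : String) : List String := (PySem.Str.split? s sep).getD [s]

-- ===== PORT A =====
def set_hl7_path_py (fields : List String) (segment : String) (field_idx : Int) (component_idx : Option Int) (subcomponent_idx : Option Int) (value : String) : List String :=
  let pos := if segment ≠ "MSH" then field_idx else field_idx - 1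
  if pos < 0 then fields
  else
    let fields := pvPad fields pos
    match component_idx with
    | none => PySem.List.pySetD fields pos value
    | some ci =>
      let current := pvOrEmpty (PySem.List.pyGetD fields pos "")
      let comps := pvSplit current "^"
      let comp_pos := ci - 1
      let comps := pvPad comps comp_pos
      match subcomponent_idx with
      | none =>
        let comps := PySem.List.pySetD comps comp_pos value
        PySem.List.pySetD fields pos (PySem.Str.join "^" comps)
      | some si =>
        let subs := pvSplit (pvOrEmpty (PySem.List.pyGetD comps comp_pos "")) "&"
        let sub_pos := si - 1
        let subs := pvPad subs sub_pos
        let subs := PySem.List.pySetD subs sub_pos value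
        let comps := PySem.List.pySetD comps comp_pos (PySem.Str.join "&" subs)
        PySem.List.pySetD fields pos (PySem.Str.join "^" comps)

-- ===== PORT B =====
-- B's recursive helper _set_at(s, indices, seps, value)
def pvSetAt (s : String) (indices : List Int) (seps : List String) (value : String) : String :=
  match indices, seps with
  | idx :: rest, sep :: seps' =>
    let parts := pvPad (pvSplit s sep) idx
    let parts :=
      if rest.isEmpty then PySem.List.pySetD parts idx value
      else PySem.List.pySetD parts idx (pvSetAt (PySem.List.pyGetD parts idx "") rest seps' value)
    PySem.Str.join sep parts
  | _, _ => s

def set_hl7_path_py_alt (fields : List String) (segment : String) (field_idx : Int) (component_idx : Option Int) (subcomponent_idx : Option Int) (value : String) : List String :=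
  let pos := if segment ≠ "MSH" then field_idx else field_idx - 1
  if pos < 0 then fields
  else
    let fields := pvPad fields pos
    match component_idx with
    | none => PySem.List.pySetD fields pos value
    | some ci =>
      let path : List Int × List String :=
        match subcomponent_idx with
        | none => ([ci - 1], ["^"])
        | some si => ([ci - 1, si - 1], ["^", "&"])
      PySem.List.pySetD fields pos
        (pvSetAt (pvOrEmpty (PySem.List.pyGetD fields pos "")) path.1 path.2 value)

-- ===== PRECONDITION & SPEC =====
-- Pre_ excludes exactly the inputs where both Pythons raise IndexError: a component
-- (resp. subcomponent) index so negative that the 1-based index minus 1 falls below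
-- minus the number of components (resp. subcomponents) of the addressed field.
def Pre_set_hl7_path_py (fields : List String) (segment : String) (field_idx : Int) (component_idx : Option Int) (subcomponent_idx : Option Int) (value : String) : Prop :=
  match component_idx with
  | none => True
  | some ci =>
    let pos := if segment ≠ "MSH" then field_idx else field_idx - 1
    pos < 0 ∨
      (let current := fields.getD pos.toNat ""
       let comps := pvSplit current "^"
       ((-(comps.length : Int) ≤ ci - 1) ∧
        (match subcomponent_idx with
         | none => True
         | some si =>
           let c := if ci - 1 < 0 then PySem.List.pyGetD comps (ci - 1) "" else comps.getD (ci - 1).toNat ""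
           let subs := pvSplit c "&"
           (-(subs.length : Int) ≤ si - 1))))
instance (fields : List String) (segment : String) (field_idx : Int) (component_idx : Option Int) (subcomponent_idx : Option Int) (value : String) : Decidable (Pre_set_hl7_path_py fields segment field_idx component_idx subcomponent_idx value) := by
  unfold Pre_set_hl7_path_py; cases component_idx <;> cases subcomponent_idx <;> dsimp only <;> infer_instance

def pvWitness_set_hl7_path_py : List String × String × Int × Option Int × Option Int × String := (["ab^cd"], "PID", 0, some 2, some 1, "X")

def Spec_set_hl7_path_py (fields : List String) (segment : String) (field_idx : Int) (component_idx : Option Int) (subcomponent_idx : Option Int) (value : String) (out : List String) : Prop := out = set_hl7_path_py_alt fields segment field_idx component_idx subcomponent_idx value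
instance (fields : List String) (segment : String) (field_idx : Int) (component_idx : Option Int) (subcomponent_idx : Option Int) (value : String) (out : List String) : Decidable (Spec_set_hl7_path_py fields segment field_idx component_idx subcomponent_idx value out) := by unfold Spec_set_hl7_path_py; infer_instance

-- ===== CLAIM (what is proved, stated in full; the proofs are below) =====
def Claim_equal_set_hl7_path_py : Prop := ∀ (fields : List String) (segment : String) (field_idx : Int) (component_idx : Option Int) (subcomponent_idx : Option Int) (value : String), Dom_set_hl7_path_py fields segment field_idx component_idx subcomponent_idx value → Pre_set_hl7_path_py fields segment field_idx component_idx subcomponent_idx value → Spec_set_hl7_path_py fields segment field_idx component_idx subcomponent_idx value (set_hl7_path_py fields segment field_idx component_idx subcomponent_idx value)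

-- ===== LEMMAS AND PROOFS =====
theorem pvOrEmpty_eq (s : String) : pvOrEmpty s = s := by
  unfold pvOrEmpty; split <;> simp_all

-- ===== VERDICT (by name: the statement is the Claim_ definition above) =====
theorem set_hl7_path_py_spec : Claim_equal_set_hl7_path_py := by
  intro fields segment field_idx component_idx subcomponent_idx value _dom _pre
  unfold Spec_set_hl7_path_py set_hl7_path_py set_hl7_path_py_alt
  cases component_idx with
  | none => rfl
  | some ci =>
    cases subcomponent_idx with
    | none => simp [pvSetAt, pvOrEmpty_eq]
    | some si => simp [pvSetAt, pvOrEmpty_eq]
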